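-- pv_equiv track=rewrite | github.com/omengeandrew-creator/privilege-escalation-detection-tool | detectors/scheduled_tasks.py | parse_scheduled_tasks
-- ===== SOURCE A (Python) =====
-- def parse_scheduled_tasks(output):
--     """Parse scheduled tasks from schtasks output"""
--     tasks = []
--     current_task = {}
--
--     for line in output.split('\n'):
--         line = line.strip()
--         if line.startswith('TaskName:'):
--             if current_task:
--                 tasks.append(current_task)
--             current_task = {'TaskName': line.split(':', 1)[1].strip()}
--         elif line.startswith('Run As User:'):
--             current_task['RunAsUser'] = line.split(':', 1)[1].strip()
--         elif line.startswith('Task To Run:'):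
--             current_task['Command'] = line.split(':', 1)[1].strip()
--         elif line.startswith('Start In:'):
--             current_task['StartIn'] = line.split(':', 1)[1].strip()
--
--     if current_task:
--         tasks.append(current_task)
--
--     return tasks
-- ===== SOURCE B (Python) =====
-- _PREFIXES = (('TaskName:', 'TaskName'), ('Run As User:', 'RunAsUser'),
--              ('Task To Run:', 'Command'), ('Start In:', 'StartIn'))
--
-- def _field(line):
--     for pref, key in _PREFIXES:
--         if line.startswith(pref):
--             return key, line.split(':', 1)[1].strip()
--     return None
--
-- def parse_scheduled_tasks(output):
--     lines = [l.strip() for l in output.split('\n')]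
--     # partition into segments: a new segment opens at each 'TaskName:' line
--     segments = []
--     cur = []
--     for l in lines:
--         if l.startswith('TaskName:'):
--             segments.append(cur)
--             cur = [l]
--         else:
--             cur.append(l)
--     segments.append(cur)
--     # map each segment to its dict (first-occurrence key order, last value wins)
--     tasks = []
--     for seg in segments:
--         d = dict(f for f in map(_field, seg) if f is not None)
--         if d:
--             tasks.append(d)
--     return tasks
-- ===== Notes on version B (the rewrite author's own statement) =====
-- stated objective: alternative
-- what changed: A's single stateful scan (mutable current-task dict plus trailing flush) is replaced by a two-phase decomposition: partition the stripped lines into segments opened at each task-name header line, then map each segment to its dict via a per-line field extractor and dict() (first-occurrence key order, last value wins), keeping only non-empty dicts.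
import Mathlib
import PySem

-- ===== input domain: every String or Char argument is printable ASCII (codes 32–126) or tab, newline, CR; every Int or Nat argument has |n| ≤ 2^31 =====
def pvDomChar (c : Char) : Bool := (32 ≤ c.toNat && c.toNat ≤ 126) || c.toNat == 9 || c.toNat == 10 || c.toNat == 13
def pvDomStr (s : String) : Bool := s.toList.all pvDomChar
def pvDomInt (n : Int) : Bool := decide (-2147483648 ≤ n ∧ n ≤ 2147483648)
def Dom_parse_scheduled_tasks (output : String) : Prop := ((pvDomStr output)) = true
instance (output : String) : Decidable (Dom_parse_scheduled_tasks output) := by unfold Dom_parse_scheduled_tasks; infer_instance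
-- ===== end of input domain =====

-- B re-decomposes A's single stateful scan into partition-into-segments + map-each-segment-to-a-dict; objective: alternative decomposition, same cost.

-- ===== PORT A =====
-- line.split(':', 1)[1].strip(); the [1] access is guarded in A by a 'startswith' of a prefix containing ':'
def pvVal (line : String) : String :=
  PySem.Str.strip ((PySem.List.pyGet? ((PySem.Str.splitMax? line ":" 1).getD []) 1).getD "")

def pvStepA (st : List (PySem.Dict String String) × PySem.Dict String String) (line0 : String) :
    List (PySem.Dict String String) × PySem.Dict String String :=
  let line := PySem.Str.strip line0
  if PySem.Str.startswith line "TaskName:" then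
    let tasks := if st.2.items.isEmpty then st.1 else st.1 ++ [st.2]
    (tasks, (PySem.Dict.empty).insert "TaskName" (pvVal line))
  else if PySem.Str.startswith line "Run As User:" then (st.1, st.2.insert "RunAsUser" (pvVal line))
  else if PySem.Str.startswith line "Task To Run:" then (st.1, st.2.insert "Command" (pvVal line))
  else if PySem.Str.startswith line "Start In:" then (st.1, st.2.insert "StartIn" (pvVal line))
  else st

def parse_scheduled_tasks (output : String) : List (List (String × String)) :=
  let st := ((PySem.Str.split? output "\n").getD []).foldl pvStepA ([], PySem.Dict.empty)
  let tasks := if st.2.items.isEmpty then st.1 else st.1 ++ [st.2]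
  tasks.map (·.items)

-- ===== PORT B =====
-- _field(line): the recognized (key, value) of a line, none if no prefix matches
def pvField? (line : String) : Option (String × String) :=
  if PySem.Str.startswith line "TaskName:" then some ("TaskName", pvVal line)
  else if PySem.Str.startswith line "Run As User:" then some ("RunAsUser", pvVal line)
  else if PySem.Str.startswith line "Task To Run:" then some ("Command", pvVal line)
  else if PySem.Str.startswith line "Start In:" then some ("StartIn", pvVal line)
  else none

-- partition the stripped lines into segments: a new segment opens at each 'TaskName:' line
def pvSegs : List String → List String → List (List String)
  | [], cur => [cur]
  | l :: ls, cur =>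
      if PySem.Str.startswith l "TaskName:" then cur :: pvSegs ls [l]
      else pvSegs ls (cur ++ [l])

-- dict(f for f in map(_field, seg) if f is not None)
def pvSegDict (seg : List String) : PySem.Dict String String :=
  (seg.filterMap pvField?).foldl (fun d p => d.insert p.1 p.2) PySem.Dict.empty

-- the body of B's second loop: append the segment's dict when non-empty
def pvEmit (acc : List (List (String × String))) (seg : List String) : List (List (String × String)) :=
  if (pvSegDict seg).items.isEmpty then acc else acc ++ [(pvSegDict seg).items]

def parse_scheduled_tasks_alt (output : String) : List (List (String × String)) :=
  let lines := ((PySem.Str.split? output "\n").getD []).map PySem.Str.strip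
  (pvSegs lines []).foldl pvEmit []

-- ===== PRECONDITION & SPEC =====
def Spec_parse_scheduled_tasks (output : String) (out : List (List (String × String))) : Prop := out = parse_scheduled_tasks_alt output
instance (output : String) (out : List (List (String × String))) : Decidable (Spec_parse_scheduled_tasks output out) := by unfold Spec_parse_scheduled_tasks; infer_instance

-- ===== CLAIM (what is proved, stated in full; the proofs are below) =====
def Claim_equal_parse_scheduled_tasks : Prop := ∀ (output : String), Dom_parse_scheduled_tasks output → Spec_parse_scheduled_tasks output (parse_scheduled_tasks output)

-- ===== LEMMAS AND PROOFS =====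

-- A's final 'if current_task: tasks.append(current_task)' plus the dict→assoc-list boundary conversion
def pvFinish (st : List (PySem.Dict String String) × PySem.Dict String String) : List (List (String × String)) :=
  (if st.2.items.isEmpty then st.1 else st.1 ++ [st.2]).map (·.items)

lemma pvEmit_acc (segs : List (List String)) :
    ∀ acc, segs.foldl pvEmit acc = acc ++ segs.foldl pvEmit [] := by
  induction segs with
  | nil => simp
  | cons s t ih =>
      intro acc
      simp only [List.foldl_cons]
      rw [ih, ih (pvEmit [] s)]
      unfold pvEmit
      split_ifs <;> simp

lemma pvSegDict_nil : pvSegDict [] = PySem.Dict.empty := rfl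

lemma pvSegDict_append (p : List String) (s : String) :
    pvSegDict (p ++ [s]) =
      match pvField? s with
      | none => pvSegDict p
      | some kv => (pvSegDict p).insert kv.1 kv.2 := by
  unfold pvSegDict
  rw [List.filterMap_append]
  cases h : pvField? s <;> simp [List.filterMap, h, List.foldl_append]

lemma pvMain : ∀ (ls : List String) (tasks : List (PySem.Dict String String)) (p : List String),
    pvFinish (ls.foldl pvStepA (tasks, pvSegDict p)) =
      tasks.map (·.items) ++ (pvSegs (ls.map PySem.Str.strip) p).foldl pvEmit [] := by
  intro ls
  induction ls with
  | nil =>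
      intro tasks p
      simp only [List.foldl_nil, List.map_nil, pvSegs, List.foldl_cons, List.foldl_nil, pvFinish, pvEmit]
      split_ifs <;> simp
  | cons l ls ih =>
      intro tasks p
      simp only [List.foldl_cons, List.map_cons, pvSegs]
      by_cases h : PySem.Str.startswith (PySem.Str.strip l) "TaskName:" = true
      all_goals (have h' := h; simp at h')
      · have hstep : pvStepA (tasks, pvSegDict p) l =
            ((if (pvSegDict p).items.isEmpty then tasks else tasks ++ [pvSegDict p]),
              pvSegDict [PySem.Str.strip l]) := by
          simp [pvStepA, pvSegDict, List.filterMap, pvField?, h']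
        rw [hstep, ih, if_pos h, List.foldl_cons, pvEmit_acc _ (pvEmit [] p)]
        unfold pvEmit
        split_ifs <;> simp
      · have hstep : pvStepA (tasks, pvSegDict p) l = (tasks, pvSegDict (p ++ [PySem.Str.strip l])) := by
          rw [pvSegDict_append]
          simp [pvStepA, pvField?, h']
          split_ifs <;> rfl
        rw [hstep, ih, if_neg h]

-- ===== VERDICT (by name: the statement is the Claim_ definition above) =====
theorem parse_scheduled_tasks_spec : Claim_equal_parse_scheduled_tasks := by
  intro output _
  unfold Spec_parse_scheduled_tasks parse_scheduled_tasks parse_scheduled_tasks_alt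
  have := pvMain ((PySem.Str.split? output "\n").getD []) [] []
  simpa [pvFinish, pvSegDict_nil] using this
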